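-- pv_equiv track=rewrite | github.com/MicrobialProteomics/CoMPaseD | Manuscript_Scripts/ProteaseScoreForSubcell.py | get_protease_combinations
-- ===== SOURCE A (Python) =====
-- from itertools import combinations
--
-- def get_protease_combinations(protease_list: list, max_proteases: int) -> list:
--     """Obtain all possible protease combinations up to max_protease items"""
--
--     # convert list to tuple for usage with itertools
--     protease_list = tuple(protease_list)
--
--     # fix cases where more proteases shall be combined than available
--     if max_proteases >= len(protease_list) + 1:
--         max_proteases = len(protease_list)
--
--     # calculate all combinations with 1 to N proteases
--     combination_list = list()
--     for ii in range(1, max_proteases + 1):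
--         # tmp_combinations = list(itertools.combinations(protease_list, ii))
--         tmp_combinations = list(combinations(protease_list, ii))
--         # itertools.combinations returns a list of tuples
--         # append each tuple to combination_list
--         for protease_ecombination in tmp_combinations:
--             combination_list.append(protease_ecombination)
--     # convert tuple elements in combination_list to lists and return
--     return [list(combin) for combin in combination_list]
-- ===== SOURCE B (Python) =====
-- def get_protease_combinations(protease_list: list, max_proteases: int) -> list:
--     """Obtain all possible protease combinations up to max_protease items"""
--     n = len(protease_list)
--     # fix cases where more proteases shall be combined than available
--     if max_proteases > n:
--         max_proteases = n
--     result = []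
--
--     def extend(start, partial, r):
--         # emit the partial combination once it has reached the target size
--         if len(partial) == r:
--             result.append(list(partial))
--             return
--         # otherwise choose each next member at a strictly larger index
--         for i in range(start, n):
--             partial.append(protease_list[i])
--             extend(i + 1, partial, r)
--             partial.pop()
--
--     for r in range(1, max_proteases + 1):
--         extend(0, [], r)
--     return result
-- ===== Notes on version B (the rewrite author's own statement) =====
-- stated objective: alternative
-- what changed: Replaces itertools.combinations with a hand-written recursive backtracking generator over start indices that emits each combination when the partial selection reaches the target size, preserving itertools' size-by-size index-lexicographic order.
import Mathlib
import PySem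

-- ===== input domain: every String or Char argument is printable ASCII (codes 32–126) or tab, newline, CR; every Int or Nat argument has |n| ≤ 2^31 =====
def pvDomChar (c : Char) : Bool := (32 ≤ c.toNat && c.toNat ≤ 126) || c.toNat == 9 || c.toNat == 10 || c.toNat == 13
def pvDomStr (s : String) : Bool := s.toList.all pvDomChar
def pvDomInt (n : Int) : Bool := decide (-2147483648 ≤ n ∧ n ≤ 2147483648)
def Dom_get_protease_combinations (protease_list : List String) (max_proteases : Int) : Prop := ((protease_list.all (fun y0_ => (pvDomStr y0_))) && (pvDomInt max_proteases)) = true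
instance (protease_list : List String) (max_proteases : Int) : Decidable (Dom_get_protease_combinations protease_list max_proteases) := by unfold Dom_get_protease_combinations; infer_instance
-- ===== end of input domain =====

-- B replaces itertools.combinations by a recursive backtracking generator over start indices
-- (same output order, same cost); objective: alternative decomposition.

-- ===== PORT A =====
-- port of itertools.combinations(xs, r) (tuples in index-lexicographic order)
def pyCombinations : List String → Nat → List (List String)
  | _, 0 => [[]]
  | [], _ + 1 => []
  | x :: rest, r + 1 =>
      (pyCombinations rest r).map (fun c => x :: c) ++ pyCombinations rest (r + 1)

def get_protease_combinations (protease_list : List String) (max_proteases : Int) : List (List String) :=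
  let max_proteases :=
    if max_proteases ≥ (protease_list.length : Int) + 1 then (protease_list.length : Int)
    else max_proteases
  let combination_list :=
    (PySem.List.pyRange 1 (max_proteases + 1) 1).foldl
      (fun acc ii =>
        (pyCombinations protease_list ii.toNat).foldl (fun acc c => acc ++ [c]) acc) []
  combination_list.map (fun c => c)

-- ===== PORT B =====
-- the inner backtracking generator of Source B: choose element indices ≥ start until |part| = r
def altExtend (pl : List String) (r : Nat) (part : List String) (start : Nat) :
    List (List String) :=
  if part.length = r then [part]
  else
    (List.range' start (pl.length - start)).attach.flatMap
      (fun i => altExtend pl r (part ++ [pl.getD i.1 ""]) (i.1 + 1))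
termination_by pl.length - start
decreasing_by
  have h := i.2
  rw [List.mem_range'] at h
  omega

def get_protease_combinations_alt (protease_list : List String) (max_proteases : Int) : List (List String) :=
  let n := protease_list.length
  let max_proteases := if max_proteases > (n : Int) then (n : Int) else max_proteases
  (PySem.List.pyRange 1 (max_proteases + 1) 1).foldl
    (fun acc r => acc ++ altExtend protease_list r.toNat [] 0) []

-- ===== PRECONDITION & SPEC =====
def Spec_get_protease_combinations (protease_list : List String) (max_proteases : Int) (out : List (List String)) : Prop := out = get_protease_combinations_alt protease_list max_proteases
instance (protease_list : List String) (max_proteases : Int) (out : List (List String)) : Decidable (Spec_get_protease_combinations protease_list max_proteases out) := by unfold Spec_get_protease_combinations; infer_instance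

-- ===== CLAIM (what is proved, stated in full; the proofs are below) =====
def Claim_equal_get_protease_combinations : Prop := ∀ (protease_list : List String) (max_proteases : Int), Dom_get_protease_combinations protease_list max_proteases → Spec_get_protease_combinations protease_list max_proteases (get_protease_combinations protease_list max_proteases)

-- ===== LEMMAS AND PROOFS =====

lemma flatMap_attach {α β : Type} (l : List α) (g : α → List β) :
    l.attach.flatMap (fun x => g x.1) = l.flatMap g := by
  conv_rhs => rw [← List.attach_map_subtype_val l]
  rw [List.flatMap_map]

-- combinations of size k+1 drawn from the suffix pl.drop start, as a flatMap over first indices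
lemma pyCombinations_drop (pl : List String) (k : Nat) :
    ∀ m start, pl.length - start = m →
      pyCombinations (pl.drop start) (k + 1) =
        (List.range' start (pl.length - start)).flatMap
          (fun i => (pyCombinations (pl.drop (i + 1)) k).map (fun c => pl.getD i "" :: c)) := by
  intro m
  induction m with
  | zero =>
      intro start h
      rw [h, List.drop_eq_nil_of_le (by omega)]
      simp [pyCombinations]
  | succ m ih =>
      intro start h
      have hs : start < pl.length := by omega
      have hd : pl.drop start = pl[start] :: pl.drop (start + 1) :=
        List.drop_eq_getElem_cons hs
      rw [h, List.range'_succ, List.flatMap_cons, hd]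
      show (pyCombinations (pl.drop (start+1)) k).map (fun c => pl[start] :: c) ++
          pyCombinations (pl.drop (start+1)) (k+1) = _
      rw [ih (start + 1) (by omega)]
      have : pl.getD start "" = pl[start] := by
        simp [List.getD_eq_getElem?_getD, List.getElem?_eq_getElem hs]
      have hm : pl.length - (start + 1) = m := by omega
      rw [this, hm]

lemma altExtend_eq (pl : List String) (r : Nat) :
    ∀ d part start, r - part.length = d → part.length ≤ r →
      altExtend pl r part start =
        (pyCombinations (pl.drop start) (r - part.length)).map (fun c => part ++ c) := by
  intro d
  induction d with
  | zero =>
      intro part start h hle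
      have he : part.length = r := by omega
      rw [altExtend, if_pos he, h]
      simp [pyCombinations]
  | succ d ih =>
      intro part start h hle
      have hne : part.length ≠ r := by omega
      rw [altExtend, if_neg hne,
        flatMap_attach (List.range' start (pl.length - start))
          (fun i => altExtend pl r (part ++ [pl.getD i ""]) (i + 1))]
      have hrw : r - part.length = d + 1 := h
      rw [hrw, pyCombinations_drop pl d (pl.length - start) start rfl, List.map_flatMap]
      apply List.flatMap_congr
      intro i _
      have hlen : (part ++ [pl.getD i ""]).length = part.length + 1 := by simp
      rw [ih (part ++ [pl.getD i ""]) (i + 1) (by rw [hlen]; omega) (by rw [hlen]; omega)]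
      rw [hlen, List.map_map]
      have hd : r - (part.length + 1) = d := by omega
      rw [hd]
      apply List.map_congr_left
      intro c _
      simp

lemma altExtend_nil (pl : List String) (r : Nat) :
    altExtend pl r [] 0 = pyCombinations pl r := by
  rw [altExtend_eq pl r r [] 0 rfl (by simp)]
  simp

-- ===== VERDICT (by name: the statement is the Claim_ definition above) =====
theorem get_protease_combinations_spec : Claim_equal_get_protease_combinations := by
  intro pl mp _
  unfold Spec_get_protease_combinations get_protease_combinations get_protease_combinations_alt
  have hcap : (if mp ≥ (pl.length : Int) + 1 then (pl.length : Int) else mp)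
      = (if mp > (pl.length : Int) then (pl.length : Int) else mp) := by
    by_cases h : mp > (pl.length : Int)
    · rw [if_pos h, if_pos (by omega)]
    · rw [if_neg h, if_neg (by omega)]
  simp only [hcap, List.map_id_fun', id]
  apply List.foldl_ext
  intro acc ii _
  rw [PySem.List.foldl_append_singleton_eq_self, altExtend_nil]
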